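-- pv_equiv track=rewrite | github.com/chaojiang06/medreadme | code/complex_span_identification/csi_data_loader.py | judge_the_belongings_of_a_span_in_span_list
-- ===== SOURCE A (Python) =====
-- def judge_the_belongings_of_a_span_in_span_list(span1, span_list):
--     start_idx = None
--     end_idx = None
--     for idx, i in enumerate(span_list):
--         if i[0] <= span1[0] < i[1] :
--             start_idx = idx
--         if i[0] < span1[1] <= i[1]:
--             end_idx = idx
--
--     return start_idx, end_idx
-- ===== SOURCE B (Python) =====
-- def judge_the_belongings_of_a_span_in_span_list(span1, span_list):
--     n = len(span_list)
--     start_idx = next((idx for idx in range(n - 1, -1, -1)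
--                       if span_list[idx][0] <= span1[0] < span_list[idx][1]), None)
--     end_idx = next((idx for idx in range(n - 1, -1, -1)
--                     if span_list[idx][0] < span1[1] <= span_list[idx][1]), None)
--     return start_idx, end_idx
-- ===== Notes on version B (the rewrite author's own statement) =====
-- stated objective: alternative
-- what changed: Replaces the single fused loop maintaining two last-match accumulators over the whole list by two independent short-circuiting reverse scans that each return the first (i.e. last overall) matching index.
import Mathlib
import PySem

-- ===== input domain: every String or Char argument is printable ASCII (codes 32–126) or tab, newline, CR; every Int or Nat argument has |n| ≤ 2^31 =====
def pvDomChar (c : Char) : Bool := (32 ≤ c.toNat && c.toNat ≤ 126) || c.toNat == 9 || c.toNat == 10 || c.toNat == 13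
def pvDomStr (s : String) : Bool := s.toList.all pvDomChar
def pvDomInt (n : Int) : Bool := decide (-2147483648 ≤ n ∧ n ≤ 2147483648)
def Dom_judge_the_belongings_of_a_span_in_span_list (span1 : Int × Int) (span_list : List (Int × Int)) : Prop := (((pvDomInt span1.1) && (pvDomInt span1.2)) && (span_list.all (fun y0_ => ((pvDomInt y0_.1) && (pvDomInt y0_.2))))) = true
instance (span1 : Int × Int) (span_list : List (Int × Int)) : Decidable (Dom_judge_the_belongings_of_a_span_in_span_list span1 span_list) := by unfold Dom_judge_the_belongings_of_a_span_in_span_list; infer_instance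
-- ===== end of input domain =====

-- B replaces A's fused accumulator loop by two independent short-circuiting reverse scans (alternative decomposition, same cost).
-- ===== PORT A =====
def judge_the_belongings_of_a_span_in_span_list (span1 : Int × Int) (span_list : List (Int × Int)) : Option Int × Option Int :=
  (PySem.List.enumerate span_list).foldl
    (fun acc p =>
      let acc1 := if p.2.1 ≤ span1.1 ∧ span1.1 < p.2.2 then (some p.1, acc.2) else acc
      if p.2.1 < span1.2 ∧ span1.2 ≤ p.2.2 then (acc1.1, some p.1) else acc1)
    (none, none)

-- ===== PORT B =====
def pvPredStart (span1 : Int × Int) (span_list : List (Int × Int)) (idx : Int) : Bool :=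
  match PySem.List.pyGet? span_list idx with
  | some i => decide (i.1 ≤ span1.1 ∧ span1.1 < i.2)
  | none => false

def pvPredEnd (span1 : Int × Int) (span_list : List (Int × Int)) (idx : Int) : Bool :=
  match PySem.List.pyGet? span_list idx with
  | some i => decide (i.1 < span1.2 ∧ span1.2 ≤ i.2)
  | none => false

def judge_the_belongings_of_a_span_in_span_list_alt (span1 : Int × Int) (span_list : List (Int × Int)) : Option Int × Option Int :=
  let n : Int := span_list.length
  let start_idx := (PySem.List.pyRange (n - 1) (-1) (-1)).find? (pvPredStart span1 span_list)
  let end_idx := (PySem.List.pyRange (n - 1) (-1) (-1)).find? (pvPredEnd span1 span_list)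
  (start_idx, end_idx)

-- ===== PRECONDITION & SPEC =====
def Spec_judge_the_belongings_of_a_span_in_span_list (span1 : Int × Int) (span_list : List (Int × Int)) (out : Option Int × Option Int) : Prop := out = judge_the_belongings_of_a_span_in_span_list_alt span1 span_list
instance (span1 : Int × Int) (span_list : List (Int × Int)) (out : Option Int × Option Int) : Decidable (Spec_judge_the_belongings_of_a_span_in_span_list span1 span_list out) := by unfold Spec_judge_the_belongings_of_a_span_in_span_list; infer_instance

-- ===== CLAIM (what is proved, stated in full; the proofs are below) =====
def Claim_equal_judge_the_belongings_of_a_span_in_span_list : Prop := ∀ (span1 : Int × Int) (span_list : List (Int × Int)), Dom_judge_the_belongings_of_a_span_in_span_list span1 span_list → Spec_judge_the_belongings_of_a_span_in_span_list span1 span_list (judge_the_belongings_of_a_span_in_span_list span1 span_list)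

-- ===== LEMMAS AND PROOFS =====

-- ===== VERDICT (by name: the statement is the Claim_ definition above) =====
-- a one-predicate last-match fold, the common shape of both components of A's fold
def pvLast (pred : (Int × Int) → Bool) (xs : List (Int × Int)) : Option Int :=
  (PySem.List.enumerate xs).foldl (fun acc p => if pred p.2 then some p.1 else acc) none

theorem find?_congr_mem {α : Type} (l : List α) (p q : α → Bool)
    (h : ∀ x ∈ l, p x = q x) : l.find? p = l.find? q := by
  induction l with
  | nil => rfl
  | cons x xs ih =>
    simp only [List.find?]
    rw [h x (List.mem_cons_self)]
    cases q x
    · exact ih fun y hy => h y (List.mem_cons_of_mem _ hy)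
    · rfl

theorem foldl_pair_split (p1 p2 : (Int × Int) → Prop) [DecidablePred p1] [DecidablePred p2] (l : List (Int × (Int × Int)))
    (a b : Option Int) :
    l.foldl (fun acc p =>
      let acc1 := if p1 p.2 then (some p.1, acc.2) else acc
      if p2 p.2 then (acc1.1, some p.1) else acc1) (a, b)
    = (l.foldl (fun acc p => if p1 p.2 then some p.1 else acc) a,
       l.foldl (fun acc p => if p2 p.2 then some p.1 else acc) b) := by
  induction l generalizing a b with
  | nil => rfl
  | cons x xs ih =>
    simp only [List.foldl_cons]
    rw [← ih]
    congr 1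
    by_cases h1 : p1 x.2 <;> by_cases h2 : p2 x.2 <;> simp [h1, h2]

theorem pvLast_append (pred : (Int × Int) → Bool) (xs : List (Int × Int)) (x : Int × Int) :
    pvLast pred (xs ++ [x])
      = if pred x then some (xs.length : Int) else pvLast pred xs := by
  unfold pvLast
  rw [PySem.List.enumerate_append, List.foldl_append]
  simp [PySem.List.enumerate_cons, PySem.List.enumerate_nil]

theorem pyGet?_append_lt (xs : List (Int × Int)) (x : Int × Int) (idx : Int)
    (h0 : 0 ≤ idx) (h : idx < (xs.length : Int)) :
    PySem.List.pyGet? (xs ++ [x]) idx = PySem.List.pyGet? xs idx := by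
  rw [PySem.List.pyGet?_of_nonneg (xs ++ [x]) h0, PySem.List.pyGet?_of_nonneg xs h0]
  exact List.getElem?_append_left (by omega)

theorem pvLast_eq_revfind (pred : (Int × Int) → Bool) (xs : List (Int × Int)) :
    pvLast pred xs
      = (PySem.List.pyRange ((xs.length : Int) - 1) (-1) (-1)).find?
          (fun idx => match PySem.List.pyGet? xs idx with
                      | some i => pred i
                      | none => false) := by
  induction xs using List.reverseRecOn with
  | nil => rfl
  | append_singleton xs x ih =>
    have hlen : ((xs ++ [x]).length : Int) - 1 = (xs.length : Int) := by simp
    rw [pvLast_append, hlen]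
    rw [PySem.List.pyRange_neg_one_cons (by omega : (-1 : Int) < (xs.length : Int))]
    simp only [List.find?_cons]
    have hx : PySem.List.pyGet? (xs ++ [x]) (xs.length : Int) = some x := by
      simp [PySem.List.pyGet?, PySem.List.pyIdx?]
    rw [hx]
    cases hpx : pred x with
    | true => simp [hpx]
    | false =>
      simp only [hpx, Bool.false_eq_true, if_false]
      rw [ih]
      apply find?_congr_mem
      intro idx hidx
      rw [PySem.List.mem_pyRange_neg_one] at hidx
      rw [pyGet?_append_lt xs x idx (by omega) (by omega)]

theorem judge_the_belongings_of_a_span_in_span_list_spec : Claim_equal_judge_the_belongings_of_a_span_in_span_list := by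
  intro span1 span_list _
  unfold Spec_judge_the_belongings_of_a_span_in_span_list
  unfold judge_the_belongings_of_a_span_in_span_list judge_the_belongings_of_a_span_in_span_list_alt
  rw [foldl_pair_split (fun i => i.1 ≤ span1.1 ∧ span1.1 < i.2) (fun i => i.1 < span1.2 ∧ span1.2 ≤ i.2)]
  have h1 := pvLast_eq_revfind (fun i => decide (i.1 ≤ span1.1 ∧ span1.1 < i.2)) span_list
  have h2 := pvLast_eq_revfind (fun i => decide (i.1 < span1.2 ∧ span1.2 ≤ i.2)) span_list
  unfold pvLast at h1 h2
  simp only [decide_eq_true_eq] at h1 h2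
  rw [h1, h2]
  rfl
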